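-- pv_equiv track=rewrite | github.com/recyalcin/etsy-variant-engine | run_inventory.py | first_free_code
-- ===== SOURCE A (Python) =====
-- from typing import List, Dict, Optional, Any, Set, Tuple
--
-- ALNUM = "0123456789ABCDEFGHIJKLMNOPQRSTUVWXYZ"
--
-- def first_free_code(existing: Set[str], length: int) -> str:
--     if length <= 0:
--         raise RuntimeError("Invalid code length")
--
--     if length == 1:
--         for a in ALNUM:
--             if a not in existing:
--                 return a
--     elif length == 2:
--         for a in ALNUM:
--             for b in ALNUM:
--                 c = a + b
--                 if c not in existing:
--                     return c
--     elif length == 3: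
--         for a in ALNUM:
--             for b in ALNUM:
--                 for c1 in ALNUM:
--                     c = a + b + c1
--                     if c not in existing:
--                         return c
--     elif length == 4:
--         for a in ALNUM:
--             for b in ALNUM:
--                 for c1 in ALNUM:
--                     for d in ALNUM:
--                         c = a + b + c1 + d
--                         if c not in existing:
--                             return c
--     raise RuntimeError("No free code available")
-- ===== SOURCE B (Python) =====
-- ALNUM = "0123456789ABCDEFGHIJKLMNOPQRSTUVWXYZ"
--
-- def first_free_code(existing, length):
--     if length <= 0:
--         raise RuntimeError("Invalid code length")
--     if length > 4:
--         raise RuntimeError("No free code available")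
--     for i in range(36 ** length):
--         n = i
--         chars = []
--         for _ in range(length):
--             chars.append(ALNUM[n % 36])
--             n //= 36
--         code = "".join(reversed(chars))
--         if code not in existing:
--             return code
--     raise RuntimeError("No free code available")
-- ===== Notes on version B (the rewrite author's own statement) =====
-- stated objective: alternative
-- what changed: Replaced the four hardcoded nested-loop branches with a single counter over range(36**length) whose base-36 digits are decoded (MSB first) into the fixed-width candidate code, so one loop handles every length uniformly.
import Mathlib
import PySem

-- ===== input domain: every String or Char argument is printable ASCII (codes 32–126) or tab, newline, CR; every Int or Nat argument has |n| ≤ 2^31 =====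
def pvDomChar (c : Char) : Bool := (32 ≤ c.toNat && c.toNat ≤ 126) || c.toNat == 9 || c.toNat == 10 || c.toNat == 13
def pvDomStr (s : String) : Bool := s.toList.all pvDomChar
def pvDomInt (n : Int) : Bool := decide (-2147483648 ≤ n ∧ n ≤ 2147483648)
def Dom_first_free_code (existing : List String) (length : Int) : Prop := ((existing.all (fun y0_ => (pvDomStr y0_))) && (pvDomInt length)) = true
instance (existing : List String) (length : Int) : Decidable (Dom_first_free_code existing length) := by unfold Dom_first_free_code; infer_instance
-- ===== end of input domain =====

-- B replaces A's four hardcoded nested loops by one counter whose base-36 digits are decoded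
-- into the fixed-width code (alternative decomposition, same cost).

-- ===== PORT A =====
-- ALNUM = "0123456789ABCDEFGHIJKLMNOPQRSTUVWXYZ" as a list of characters
def alnum : List Char := "0123456789ABCDEFGHIJKLMNOPQRSTUVWXYZ".toList

-- literal port of A: four branches of nested for-loops with early return
-- (each Python `for … return` chain is the obvious List.findSome?; the final
-- `raise RuntimeError` branches return "" and are excluded by Pre_).
def first_free_code (existing : List String) (length : Int) : String :=
  if length ≤ 0 then ""  -- raise RuntimeError("Invalid code length")
  else if length = 1 then
    match alnum.findSome? (fun a =>
        let c := String.mk [a]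
        if existing.contains c then none else some c) with
    | some c => c
    | none => ""  -- raise RuntimeError("No free code available")
  else if length = 2 then
    match alnum.findSome? (fun a => alnum.findSome? (fun b =>
        let c := String.mk [a, b]
        if existing.contains c then none else some c)) with
    | some c => c
    | none => ""
  else if length = 3 then
    match alnum.findSome? (fun a => alnum.findSome? (fun b => alnum.findSome? (fun c1 =>
        let c := String.mk [a, b, c1]
        if existing.contains c then none else some c))) with
    | some c => c
    | none => ""
  else if length = 4 then
    match alnum.findSome? (fun a => alnum.findSome? (fun b => alnum.findSome? (fun c1 => alnum.findSome? (fun d =>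
        let c := String.mk [a, b, c1, d]
        if existing.contains c then none else some c)))) with
    | some c => c
    | none => ""
  else ""  -- raise RuntimeError("No free code available")

-- ===== PORT B =====
-- the inner loop of Source B: `for _ in range(k): chars.append(ALNUM[n % 36]); n //= 36`
-- (ALNUM[n % 36] is always in range, ported as getD)
def digitsLSB (n : Nat) (k : Nat) : List Char :=
  match k with
  | 0 => []
  | k + 1 => alnum.getD (n % 36) '0' :: digitsLSB (n / 36) k

-- literal port of B: one counter i over range(36**length); code = reversed digit list
def first_free_code_alt (existing : List String) (length : Int) : String :=
  if length ≤ 0 then ""  -- raise RuntimeError("Invalid code length")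
  else if 4 < length then ""  -- raise RuntimeError("No free code available")
  else
    match (List.range (36 ^ length.toNat)).findSome? (fun i =>
        let code := String.mk (digitsLSB i length.toNat).reverse
        if existing.contains code then none else some code) with
    | some c => c
    | none => ""  -- raise RuntimeError("No free code available")

-- ===== PRECONDITION & SPEC =====
-- Pre_ excludes the inputs on which Python A raises RuntimeError: length outside 1..4,
-- and exhaustion (every length-letter alphanumeric code already present in `existing`).
def Pre_first_free_code (existing : List String) (length : Int) : Prop :=
  1 ≤ length ∧ length ≤ 4 ∧
  (existing.dedup.filter (fun s =>
      s.toList.length == length.toNat && s.toList.all (alnum.contains ·))).length < 36 ^ length.toNat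
instance (existing : List String) (length : Int) : Decidable (Pre_first_free_code existing length) := by
  unfold Pre_first_free_code; infer_instance

def pvWitness_first_free_code : List String × Int := (["0", "ZZ"], 2)

def Spec_first_free_code (existing : List String) (length : Int) (out : String) : Prop := out = first_free_code_alt existing length
instance (existing : List String) (length : Int) (out : String) : Decidable (Spec_first_free_code existing length out) := by unfold Spec_first_free_code; infer_instance

-- ===== CLAIM (what is proved, stated in full; the proofs are below) =====
def Claim_equal_first_free_code : Prop := ∀ (existing : List String) (length : Int), Dom_first_free_code existing length → Pre_first_free_code existing length → Spec_first_free_code existing length (first_free_code existing length)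

-- ===== LEMMAS AND PROOFS =====

-- the check applied to each candidate code (proof-side abbreviation)
def chk (existing : List String) (cs : List Char) : Option String :=
  if existing.contains (String.mk cs) then none else some (String.mk cs)

-- A's nested loops, recursively: nestedA k f runs k nested loops over alnum
def nestedA (k : Nat) (f : List Char → Option String) : Option String :=
  match k with
  | 0 => f []
  | k + 1 => alnum.findSome? (fun a => nestedA k (fun cs => f (a :: cs)))

-- B's enumeration as a list of codes
def enumB (k : Nat) : List (List Char) :=
  (List.range (36 ^ k)).map (fun i => (digitsLSB i k).reverse)

theorem findSome?_flatMap {α β γ : Type} (l : List α) (g : α → List β) (f : β → Option γ) :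
    (l.flatMap g).findSome? f = l.findSome? (fun a => (g a).findSome? f) := by
  induction l with
  | nil => rfl
  | cons x xs ih =>
    simp [List.flatMap_cons, List.findSome?_append, List.findSome?_cons, ih]
    cases (g x).findSome? f <;> simp

theorem alnum_eq_range : alnum = (List.range 36).map (fun d => alnum.getD d '0') := by decide

theorem range_mul (a b : Nat) :
    List.range (a * b) = (List.range a).flatMap (fun d => (List.range b).map (fun r => d * b + r)) := by
  induction a with
  | zero => simp
  | succ a ih =>
    rw [Nat.succ_mul, List.range_add, ih, List.range_succ, List.flatMap_append]
    simp [Nat.add_comm]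

theorem digitsLSB_split (k d r : Nat) (hd : d < 36) (hr : r < 36 ^ k) :
    (digitsLSB (d * 36 ^ k + r) (k + 1)).reverse = alnum.getD d '0' :: (digitsLSB r k).reverse := by
  induction k generalizing r with
  | zero =>
    interval_cases r
    simp [digitsLSB, Nat.mod_eq_of_lt hd]
  | succ k ih =>
    have hmod : (d * 36 ^ (k + 1) + r) % 36 = r % 36 := by
      have : d * 36 ^ (k + 1) + r = r + d * 36 ^ k * 36 := by ring
      rw [this, Nat.add_mul_mod_self_right]
    have hdiv : (d * 36 ^ (k + 1) + r) / 36 = d * 36 ^ k + r / 36 := by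
      have : d * 36 ^ (k + 1) + r = r + d * 36 ^ k * 36 := by ring
      rw [this, Nat.add_mul_div_right _ _ (by norm_num : (0:Nat) < 36)]
      omega
    have hr' : r / 36 < 36 ^ k := by
      apply Nat.div_lt_of_lt_mul
      calc r < 36 ^ (k + 1) := hr
        _ = 36 * 36 ^ k := by ring
    have hrec := ih (r / 36) hr'
    show ((digitsLSB ((d * 36 ^ (k+1) + r)) (k + 2))).reverse = _
    rw [show digitsLSB (d * 36 ^ (k+1) + r) (k + 2) =
        alnum.getD ((d * 36 ^ (k+1) + r) % 36) '0' :: digitsLSB ((d * 36 ^ (k+1) + r) / 36) (k+1) from rfl,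
      hmod, hdiv]
    rw [show digitsLSB r (k+1) = alnum.getD (r % 36) '0' :: digitsLSB (r / 36) k from rfl]
    simp [hrec]

theorem enumB_succ (k : Nat) :
    enumB (k + 1) = (List.range 36).flatMap (fun d => (enumB k).map (fun cs => alnum.getD d '0' :: cs)) := by
  unfold enumB
  rw [show (36 : Nat) ^ (k + 1) = 36 * 36 ^ k from by ring, range_mul, List.map_flatMap]
  apply List.flatMap_congr
  intro d hd
  rw [List.map_map, List.map_map]
  apply List.map_congr_left
  intro r hr
  exact digitsLSB_split k d r (List.mem_range.mp hd) (List.mem_range.mp hr)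

theorem alnum_findSome? {g : Char → Option String} :
    alnum.findSome? g = (List.range 36).findSome? (fun d => g (alnum.getD d '0')) := by
  conv_lhs => rw [alnum_eq_range]
  rw [List.findSome?_map]
  rfl

theorem nestedA_eq (k : Nat) (f : List Char → Option String) :
    nestedA k f = (enumB k).findSome? f := by
  induction k generalizing f with
  | zero => simp [nestedA, enumB, digitsLSB]
  | succ k ih =>
    rw [enumB_succ, findSome?_flatMap]
    show alnum.findSome? (fun a => nestedA k (fun cs => f (a :: cs))) = _
    rw [alnum_findSome?]
    congr 1
    funext d
    rw [ih]
    rw [List.findSome?_map]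
    rfl

theorem enumB_findSome? (existing : List String) (k : Nat) :
    (enumB k).findSome? (chk existing) =
    (List.range (36 ^ k)).findSome? (fun i => chk existing (digitsLSB i k).reverse) := by
  unfold enumB
  rw [List.findSome?_map]
  rfl

theorem altB (existing : List String) (length : Int) (k : Nat)
    (h1 : ¬ length ≤ 0) (h2 : ¬ 4 < length) (hk : length.toNat = k) :
    first_free_code_alt existing length =
    (match (enumB k).findSome? (chk existing) with | some c => c | none => "") := by
  unfold first_free_code_alt
  rw [if_neg h1, if_neg h2, hk, enumB_findSome? existing k]
  rfl

theorem first_free_code_spec : Claim_equal_first_free_code := by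
  intro existing length _ hpre
  obtain ⟨h1, h4, -⟩ := hpre
  unfold Spec_first_free_code
  have hcase : length = 1 ∨ length = 2 ∨ length = 3 ∨ length = 4 := by omega
  rcases hcase with h | h | h | h <;> subst h
  · calc first_free_code existing 1
        = (match nestedA 1 (chk existing) with | some c => c | none => "") := rfl
      _ = (match (enumB 1).findSome? (chk existing) with | some c => c | none => "") := by
          rw [nestedA_eq]
      _ = first_free_code_alt existing 1 :=
          (altB existing 1 1 (by norm_num) (by norm_num) rfl).symm
  · calc first_free_code existing 2
        = (match nestedA 2 (chk existing) with | some c => c | none => "") := rfl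
      _ = (match (enumB 2).findSome? (chk existing) with | some c => c | none => "") := by
          rw [nestedA_eq]
      _ = first_free_code_alt existing 2 :=
          (altB existing 2 2 (by norm_num) (by norm_num) rfl).symm
  · calc first_free_code existing 3
        = (match nestedA 3 (chk existing) with | some c => c | none => "") := rfl
      _ = (match (enumB 3).findSome? (chk existing) with | some c => c | none => "") := by
          rw [nestedA_eq]
      _ = first_free_code_alt existing 3 :=
          (altB existing 3 3 (by norm_num) (by norm_num) rfl).symm
  · calc first_free_code existing 4
        = (match nestedA 4 (chk existing) with | some c => c | none => "") := rfl
      _ = (match (enumB 4).findSome? (chk existing) with | some c => c | none => "") := by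
          rw [nestedA_eq]
      _ = first_free_code_alt existing 4 :=
          (altB existing 4 4 (by norm_num) (by norm_num) rfl).symm
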